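-- pv_equiv track=rewrite | github.com/inhabae/Splendor-Zero | nn/selfplay_dataset.py | _compute_games_per_worker
-- ===== SOURCE A (Python) =====
-- def _compute_games_per_worker(games: int, workers: int) -> list[int]:
--     if games <= 0:
--         raise ValueError("games must be positive")
--     if workers <= 0:
--         raise ValueError("workers must be positive")
--     workers = min(int(workers), int(games))
--     base, remainder = divmod(int(games), int(workers))
--     return [base + (1 if idx < remainder else 0) for idx in range(workers)]
-- ===== SOURCE B (Python) =====
-- def _compute_games_per_worker(games: int, workers: int) -> list[int]:
--     if games <= 0:
--         raise ValueError("games must be positive")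
--     if workers <= 0:
--         raise ValueError("workers must be positive")
--     workers = min(int(workers), int(games))
--     result = []
--     remaining_games = games
--     remaining_workers = workers
--     while remaining_workers > 0:
--         share = -(-remaining_games // remaining_workers)
--         result.append(share)
--         remaining_games -= share
--         remaining_workers -= 1
--     return result
-- ===== Notes on version B (the rewrite author's own statement) =====
-- stated objective: alternative
-- what changed: Replaces the divmod-plus-remainder comprehension with a running-remainder loop that gives each worker the integer ceiling of remaining_games/remaining_workers, never computing divmod or comparing an index to the remainder.
import Mathlib
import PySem

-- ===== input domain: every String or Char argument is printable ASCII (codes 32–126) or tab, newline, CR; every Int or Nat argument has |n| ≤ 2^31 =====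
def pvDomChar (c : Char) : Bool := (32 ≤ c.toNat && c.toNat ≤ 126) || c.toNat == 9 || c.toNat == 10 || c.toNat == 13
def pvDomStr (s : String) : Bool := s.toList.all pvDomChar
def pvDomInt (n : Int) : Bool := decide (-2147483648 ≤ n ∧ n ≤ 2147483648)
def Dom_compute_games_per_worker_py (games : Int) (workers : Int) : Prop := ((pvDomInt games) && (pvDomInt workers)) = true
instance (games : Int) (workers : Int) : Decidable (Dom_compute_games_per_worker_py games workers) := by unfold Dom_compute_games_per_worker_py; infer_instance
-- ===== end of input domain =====

-- B replaces A's divmod + remainder comparison by a running-remainder loop handing each worker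
-- the integer ceiling of remaining_games / remaining_workers (alternative decomposition, same cost).
-- Pre_ excludes exactly the inputs (games ≤ 0 or workers ≤ 0) on which A raises ValueError.

-- ===== PORT A =====
def compute_games_per_worker_py (games : Int) (workers : Int) : List Int :=
  let workers := min workers games
  let base := PySem.Int.floordiv games workers
  let remainder := PySem.Int.mod games workers
  (PySem.List.pyRange 0 workers 1).map (fun idx => base + (if idx < remainder then 1 else 0))

-- ===== PORT B =====
-- while remaining_workers > 0: fuel = number of iterations (= workers, clamped)
def pvAltLoop : Nat → Int → Int → List Int
  | 0, _, _ => []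
  | n + 1, remaining_games, remaining_workers =>
      let share := -(PySem.Int.floordiv (-remaining_games) remaining_workers)
      share :: pvAltLoop n (remaining_games - share) (remaining_workers - 1)

def compute_games_per_worker_py_alt (games : Int) (workers : Int) : List Int :=
  let workers := min workers games
  pvAltLoop workers.toNat games workers

-- ===== PRECONDITION & SPEC =====
-- exactly the inputs on which A returns (otherwise it raises ValueError)
def Pre_compute_games_per_worker_py (games : Int) (workers : Int) : Prop := 0 < games ∧ 0 < workers
instance (games : Int) (workers : Int) : Decidable (Pre_compute_games_per_worker_py games workers) := by unfold Pre_compute_games_per_worker_py; infer_instance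
def pvWitness_compute_games_per_worker_py : Int × Int := (7, 3)

def Spec_compute_games_per_worker_py (games : Int) (workers : Int) (out : List Int) : Prop := out = compute_games_per_worker_py_alt games workers
instance (games : Int) (workers : Int) (out : List Int) : Decidable (Spec_compute_games_per_worker_py games workers out) := by unfold Spec_compute_games_per_worker_py; infer_instance

-- ===== CLAIM (what is proved, stated in full; the proofs are below) =====
def Claim_equal_compute_games_per_worker_py : Prop := ∀ (games : Int) (workers : Int), Dom_compute_games_per_worker_py games workers → Pre_compute_games_per_worker_py games workers → Spec_compute_games_per_worker_py games workers (compute_games_per_worker_py games workers)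


-- ===== LEMMAS AND PROOFS =====

-- the ceiling loop on g = base*n + r (1 <= base, 0 <= r <= n) produces A's front-loaded list
lemma pvAltLoop_eq (n : Nat) : ∀ (base r : Int), 1 ≤ base → 0 ≤ r → r ≤ (n : Int) →
    pvAltLoop n (base * n + r) n
      = (List.range n).map (fun (i : Nat) => base + (if (i : Int) < r then 1 else 0)) := by
  induction n with
  | zero =>
    intro base r _ h0 h1
    have hr0 : r = 0 := by omega
    subst hr0
    simp [pvAltLoop]
  | succ n ih =>
    intro base r hb h0 h1
    have hpos : (0 : Int) < ((n + 1 : Nat) : Int) := by push_cast; omega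
    have hshare : -(PySem.Int.floordiv (-(base * ((n + 1 : Nat) : Int) + r)) ((n + 1 : Nat) : Int))
        = base + (if (0 : Int) < r then 1 else 0) := by
      rw [PySem.Int.neg_floordiv_neg_eq_iff_of_pos hpos]
      push_cast at h1 ⊢
      split_ifs with hr
      · constructor <;> nlinarith
      · have hr0 : r = 0 := by omega
        constructor <;> nlinarith
    rw [List.range_succ_eq_map]
    simp only [pvAltLoop, hshare, List.map_cons, List.map_map]
    congr 1
    by_cases hr : (0 : Int) < r
    · rw [if_pos hr]
      push_cast
      have hk : ((n : Int) + 1 - 1) = (n : Int) := by ring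
      have harg : base * ((n : Int) + 1) + r - (base + 1) = base * (n : Int) + (r - 1) := by ring
      rw [harg, hk, ih base (r - 1) hb (by omega) (by push_cast at h1 ⊢; omega)]
      apply List.map_congr_left
      intro i _
      simp only [Function.comp_apply]
      congr 1
      push_cast
      split_ifs <;> omega
    · rw [if_neg hr]
      have hr0 : r = 0 := by omega
      subst hr0
      push_cast
      have hk : ((n : Int) + 1 - 1) = (n : Int) := by ring
      have harg : base * ((n : Int) + 1) + 0 - (base + 0) = base * (n : Int) + 0 := by ring
      rw [harg, hk, ih base 0 hb le_rfl (Int.natCast_nonneg n)]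
      apply List.map_congr_left
      intro i _
      simp only [Function.comp_apply]
      have hs : ¬ ((Nat.succ i : Nat) : Int) < 0 := by push_cast; omega
      have hi : ¬ ((i : Nat) : Int) < 0 := by omega
      rw [if_neg hs, if_neg hi]

-- ===== VERDICT (by name: the statement is the Claim_ definition above) =====
theorem compute_games_per_worker_py_spec : Claim_equal_compute_games_per_worker_py := by
  intro games workers _ hpre
  obtain ⟨hg, hw⟩ := hpre
  unfold Spec_compute_games_per_worker_py
  unfold compute_games_per_worker_py compute_games_per_worker_py_alt
  simp only []
  set w := min workers games with hwdef
  have hwg : w ≤ games := min_le_right workers games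
  have hwpos : (0 : Int) < w := lt_min hw hg
  have hcast : ((w.toNat : Nat) : Int) = w := Int.toNat_of_nonneg (le_of_lt hwpos)
  set base := PySem.Int.floordiv games w with hbdef
  set r := PySem.Int.mod games w with hrdef
  have hsum : base * w + r = games := PySem.Int.floordiv_mul_add_mod games w
  have hre : r = games % w := by rw [hrdef, PySem.Int.mod_eq_emod_of_pos hwpos]
  have hr0 : 0 ≤ r := by rw [hre]; exact Int.emod_nonneg games (ne_of_gt hwpos)
  have hr1 : r < w := by rw [hre]; exact Int.emod_lt_of_pos games hwpos
  have hbase : 1 ≤ base := by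
    rw [hbdef, PySem.Int.floordiv_eq_ediv_of_pos hwpos]
    exact Int.le_ediv_iff_mul_le hwpos |>.mpr (by nlinarith)
  have hgames : games = base * ((w.toNat : Nat) : Int) + r := by rw [hcast]; omega
  have hwcast : w = ((w.toNat : Nat) : Int) := hcast.symm
  have halt : pvAltLoop w.toNat games w
      = (List.range w.toNat).map (fun (i : Nat) => base + (if (i : Int) < r then 1 else 0)) := by
    have h := pvAltLoop_eq w.toNat base r hbase hr0 (by rw [hcast]; exact le_of_lt hr1)
    rw [hcast] at h
    rwa [hsum] at h
  rw [PySem.List.pyRange_one, halt]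
  have hlen : ((w - 0 : Int)).toNat = w.toNat := by norm_num
  rw [hlen, List.map_map]
  apply List.map_congr_left
  intro i _
  simp only [Function.comp_apply, zero_add]
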